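-- pv_equiv track=rewrite | github.com/ysmhub/aoc2k19 | day04/d4p2.py | hasLargeGroup
-- ===== SOURCE A (Python) =====
-- from collections import Counter
--
-- def hasLargeGroup(y):
--     found = False
--     s = str(y)
--     l = len(s)
--     digits = [int(d) for d in str(y)]
--     unique_digits = Counter(digits).keys()
--     o = []
--     for x in unique_digits:
--         start = 0
--         count = 0
--         for z in range(start,l):
--             if int(s[z]) == x:
--                 count = count + 1
--             start = start + 1
--         o.append(count)
--
--     if 2 in o:
--         found = True
--
--     return found
-- ===== SOURCE B (Python) =====
-- from collections import Counter
--
-- def hasLargeGroup(y):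
--     counts = Counter(int(d) for d in str(y))
--     return 2 in counts.values()
-- ===== Notes on version B (the rewrite author's own statement) =====
-- stated objective: simpler
-- what changed: Replaced the per-unique-digit rescan of the whole string (building a list of counts and testing membership) by a single Counter pass whose values are tested for 2 directly.
import Mathlib
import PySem

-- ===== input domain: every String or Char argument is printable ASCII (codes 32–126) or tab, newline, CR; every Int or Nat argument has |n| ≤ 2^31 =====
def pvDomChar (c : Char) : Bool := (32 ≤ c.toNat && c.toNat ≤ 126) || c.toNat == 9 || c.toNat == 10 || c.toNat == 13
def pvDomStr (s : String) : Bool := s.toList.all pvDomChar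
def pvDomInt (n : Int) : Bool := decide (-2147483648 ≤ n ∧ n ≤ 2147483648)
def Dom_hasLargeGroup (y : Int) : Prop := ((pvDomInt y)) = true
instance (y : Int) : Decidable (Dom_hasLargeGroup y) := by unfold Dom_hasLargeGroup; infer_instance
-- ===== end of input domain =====

-- ===== PORT A =====
-- B drops the per-unique-digit rescan of the string in favour of one Counter pass.
-- A's dead `start` variable (incremented but never read) is omitted.
def hasLargeGroup (y : Int) : Bool :=
  let found := false
  let s := PySem.Int.toChars y
  let l : Int := s.length
  let digits := s.map (fun d => (PySem.Int.ofChars? [d]).getD 0)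
  let unique_digits := (PySem.Dict.counter digits).keys
  let o := unique_digits.foldl (fun o x =>
    let count := (PySem.List.pyRange 0 l 1).foldl (fun count z =>
      if (PySem.Int.ofChars? [PySem.List.pyGetD s z ' ']).getD 0 == x then count + 1
      else count) (0 : Int)
    o ++ [count]) ([] : List Int)
  let found := if o.contains 2 then true else found
  found

-- ===== PORT B =====
def hasLargeGroup_alt (y : Int) : Bool :=
  let counts := PySem.Dict.counter
    ((PySem.Int.toChars y).map (fun d => (PySem.Int.ofChars? [d]).getD 0))
  counts.values.contains 2

-- ===== PRECONDITION & SPEC =====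
-- Pre_ excludes negative y, on which Python int() of the sign character raises ValueError in both programs.
def Pre_hasLargeGroup (y : Int) : Prop := 0 <= y
instance (y : Int) : Decidable (Pre_hasLargeGroup y) := by unfold Pre_hasLargeGroup; infer_instance
def pvWitness_hasLargeGroup : Int := (122345)
def Spec_hasLargeGroup (y : Int) (out : Bool) : Prop := out = hasLargeGroup_alt y
instance (y : Int) (out : Bool) : Decidable (Spec_hasLargeGroup y out) := by unfold Spec_hasLargeGroup; infer_instance

-- ===== CLAIM (what is proved, stated in full; the proofs are below) =====
def Claim_equal_hasLargeGroup : Prop := ∀ (y : Int), Dom_hasLargeGroup y → Pre_hasLargeGroup y → Spec_hasLargeGroup y (hasLargeGroup y)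

-- ===== LEMMAS AND PROOFS =====

theorem inner_count (s : List Char) (x : Int) :
    (PySem.List.pyRange 0 (s.length : Int) 1).foldl (fun count z =>
      if (PySem.Int.ofChars? [PySem.List.pyGetD s z ' ']).getD 0 == x then count + 1
      else count) (0 : Int)
    = (s.map (fun d => (PySem.Int.ofChars? [d]).getD 0)).count x := by
  rw [PySem.List.foldl_pyRange_zero_pyGetD' s ' '
      (fun count d => if (PySem.Int.ofChars? [d]).getD 0 == x then count + 1 else count) 0]
  rw [PySem.List.foldl_count_if]
  simp [List.count_eq_countP, List.countP_map, Function.comp_def]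

-- ===== VERDICT (by name: the statement is the Claim_ definition above) =====
theorem hasLargeGroup_spec : Claim_equal_hasLargeGroup := by
  intro y _ _
  unfold Spec_hasLargeGroup hasLargeGroup hasLargeGroup_alt
  simp only [PySem.List.foldl_append_singleton_eq_map, inner_count]
  rw [PySem.Dict.values_eq_map_keys _ (PySem.Dict.nodup_keys_counter _) 0]
  simp only [PySem.Dict.getD_counter]
  simp
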